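-- pv_equiv track=rewrite | github.com/algo-gogo/algo_study | 프로그래머스/코딩테스트/sk/intern/1.py | solution
-- ===== SOURCE A (Python) =====
-- def solution(p):
--     result_list = [0 for _ in range(len(p))]
--
--     for i in range(len(p) - 1):
--         value = p[i]
--         left_list = p[i + 1:]
--         left_list_min_value = min(left_list)
--         if value > left_list_min_value:
--             left_list_index = left_list.index(left_list_min_value) + i + 1
--             p[i], p[left_list_index] = p[left_list_index], p[i]
--             result_list[i] += 1
--             result_list[left_list_index] += 1
--
--     return result_list
-- ===== SOURCE B (Python) =====
-- def solution(p):
--     # Two-phase alternative: a forward pass over successive suffixes records,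
--     # per step, which tail slot (if any) receives the displaced head; a backward
--     # pass then assembles the count list back-to-front, consing 1/0 and bumping
--     # the recorded source slot.  No index arithmetic into a global result list.
--     # Note: unlike A, B does not mutate the caller's list (return value only).
--     ops = []
--     cur = list(p)
--     while len(cur) > 1:
--         head, tail = cur[0], cur[1:]
--         m = min(tail)
--         if head > m:
--             j = tail.index(m)
--             tail[j] = head
--             ops.append(j)
--         else:
--             ops.append(None)
--         cur = tail
--     out = [0] * (1 if p else 0)
--     for op in reversed(ops):
--         if op is None:
--             out = [0] + out
--         else:
--             out[op] += 1
--             out = [1] + out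
--     return out
-- ===== Notes on version B (the rewrite author's own statement) =====
-- stated objective: alternative
-- what changed: Replaces A's index loop over a mutated global array and pre-allocated result list by structural recursion on the suffix: the displaced head is written into the min's slot of the tail, and the count list is built back-to-front by consing 1/0 and bumping the source slot in the recursive result; B also does not mutate the caller's list.
import Mathlib
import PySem

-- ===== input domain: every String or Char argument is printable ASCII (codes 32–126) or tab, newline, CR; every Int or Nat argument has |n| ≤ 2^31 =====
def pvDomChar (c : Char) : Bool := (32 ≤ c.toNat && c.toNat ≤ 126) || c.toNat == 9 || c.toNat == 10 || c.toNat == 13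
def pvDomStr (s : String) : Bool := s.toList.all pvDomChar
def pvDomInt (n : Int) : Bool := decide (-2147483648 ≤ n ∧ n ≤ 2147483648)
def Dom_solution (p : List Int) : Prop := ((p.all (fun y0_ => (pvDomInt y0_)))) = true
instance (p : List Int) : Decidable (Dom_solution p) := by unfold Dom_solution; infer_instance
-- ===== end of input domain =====

-- B replaces A's index loop by structural recursion on the suffix, building the
-- count list back-to-front (objective: alternative; same cost).  A mutates the
-- caller's list in place, B does not: the claim is about the RETURN value only.

-- ===== PORT A =====
-- 'for i in range(len(p) - 1)' with in-place updates of p and result_list,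
-- as the obvious recursion on the loop index i over the same state.
def solutionLoop (n : Nat) (i : Nat) (p res : List Int) : List Int :=
  if _h : i < n - 1 then
    let value := (PySem.List.pyGet? p (i : Int)).getD 0      -- p[i], always in range here
    let left_list := PySem.List.slice p (some ((i : Int) + 1)) none   -- p[i+1:]
    let m := (PySem.List.min? left_list (fun x => x)).getD 0 -- min(left_list), nonempty here
    if value > m then
      let j := ((PySem.List.index? left_list m).getD 0) + i + 1
      let p' := (p.set i m).set j value                      -- p[i], p[j] = p[j], p[i]
      let res' := (res.modify i (· + 1)).modify j (· + 1)    -- result_list[i] += 1; result_list[j] += 1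
      solutionLoop n (i + 1) p' res'
    else
      solutionLoop n (i + 1) p res
  else res
termination_by n - i

def solution (p : List Int) : List Int :=
  solutionLoop p.length 0 p (List.replicate p.length 0)

-- ===== PORT B =====
-- forward pass: 'while len(cur) > 1' over successive suffixes, recording per
-- step which tail slot (if any) receives the displaced head
def solOps : List Int → List (Option Nat)
  | [] => []
  | [_] => []
  | x :: y :: t =>
    let tail := y :: t
    let m := (PySem.List.min? tail (fun z => z)).getD 0
    if x > m then
      let j := (PySem.List.index? tail m).getD 0
      some j :: solOps (tail.set j x)
    else
      none :: solOps tail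
termination_by xs => xs.length
decreasing_by all_goals simp_all [List.length_set]

-- backward pass: 'for op in reversed(ops)' building out back-to-front = foldr
def solBuildStep (op : Option Nat) (out : List Int) : List Int :=
  match op with
  | none => 0 :: out
  | some j => 1 :: out.modify j (· + 1)

def solution_alt (p : List Int) : List Int :=
  (solOps p).foldr solBuildStep (if p = [] then [] else [0])

-- ===== PRECONDITION & SPEC =====
def Spec_solution (p : List Int) (out : List Int) : Prop := out = solution_alt p
instance (p : List Int) (out : List Int) : Decidable (Spec_solution p out) := by unfold Spec_solution; infer_instance

-- ===== CLAIM (what is proved, stated in full; the proofs are below) =====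
def Claim_equal_solution : Prop := ∀ (p : List Int), Dom_solution p → Spec_solution p (solution p)

-- ===== LEMMAS AND PROOFS =====

-- proof-side helper: the one-pass recursive form of B (forward and backward
-- passes fused); solOps/foldr is shown equal to it in solOps_go below
def solGo : List Int → List Int
  | [] => []
  | [_] => [0]
  | x :: y :: t =>
    let tail := y :: t
    let m := (PySem.List.min? tail (fun z => z)).getD 0
    if x > m then
      let j := (PySem.List.index? tail m).getD 0
      let rest := solGo (tail.set j x)
      1 :: rest.modify j (· + 1)
    else
      0 :: solGo tail
termination_by xs => xs.length
decreasing_by all_goals simp_all [List.length_set]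

theorem solOps_go (xs : List Int) :
    (solOps xs).foldr solBuildStep (if xs = [] then [] else [0]) = solGo xs := by
  induction xs using solOps.induct
  case case1 => rw [solOps, solGo]; simp
  case case2 x => rw [solOps, solGo]; simp
  case case3 x y t tail m hgt j ih =>
    simp only [tail, m, j] at hgt ih
    rw [solOps, solGo]
    simp only [if_pos hgt, List.foldr_cons, solBuildStep]
    simp at ih
    simp [ih]
  case case4 x y t tail m hle ih =>
    simp only [tail, m] at hle ih
    rw [solOps, solGo]
    simp only [if_neg hle, List.foldr_cons, solBuildStep]
    simp at ih
    simp [ih]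

theorem solGo_length (xs : List Int) : (solGo xs).length = xs.length := by
  induction xs using solGo.induct
  case case1 => simp [solGo]
  case case2 => simp [solGo]
  case case3 x y t tail m hgt j ih =>
    simp only [tail, m, j] at hgt ih
    rw [solGo]
    simp only [if_pos hgt, List.length_cons, List.length_modify, ih, List.length_set]
  case case4 x y t tail m hle ih =>
    simp only [tail, m] at hle ih
    rw [solGo]
    simp only [if_neg hle, List.length_cons, ih]

theorem zip_zero_right (res ys : List Int) (hlen : res.length ≤ ys.length)
    (hz : ∀ k (hk : k < ys.length), ys[k] = 0) : List.zipWith (· + ·) res ys = res := by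
  apply List.ext_getElem
  · simp [List.length_zipWith]; omega
  · intro k h1 h2
    simp only [List.getElem_zipWith]
    rw [hz k (by omega)]
    simp

theorem key_eq (res R : List Int) (i j' : Nat) (hj : j' < R.length)
    (hlen : res.length = i + 1 + R.length) :
    List.zipWith (· + ·) ((res.modify i (· + 1)).modify (j' + i + 1) (· + 1))
      (List.replicate (i + 1) 0 ++ R)
    = List.zipWith (· + ·) res (List.replicate i 0 ++ (1 :: R.modify j' (· + 1))) := by
  apply List.ext_getElem?
  intro k
  simp only [List.getElem?_zipWith, List.getElem?_modify, List.getElem?_append,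
    List.getElem?_replicate, List.getElem?_cons, List.length_replicate]
  by_cases hk : k < res.length
  · rw [List.getElem?_eq_getElem hk]
    by_cases h1 : k < i
    · simp [h1, show k < i + 1 by omega, show ¬ i = k by omega, show ¬ (j' + i + 1 = k) by omega]
    · by_cases h2 : k = i
      · subst h2
        simp [show k < k + 1 by omega, show ¬ k < k by omega, show ¬ (j' + k + 1 = k) by omega]
      · obtain ⟨d, rfl⟩ : ∃ d, k = i + 1 + d := ⟨k - i - 1, by omega⟩
        have hd : d < R.length := by omega
        rw [List.getElem?_eq_getElem (l := R) (by omega : i + 1 + d - (i + 1) < R.length)]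
        rw [List.getElem?_eq_getElem (l := R) (by omega : i + 1 + d - i - 1 < R.length)]
        simp only [show ¬ (i + 1 + d < i + 1) by omega, show ¬ (i + 1 + d < i) by omega,
          show ¬ (i = i + 1 + d) by omega, show ¬ (i + 1 + d - i = 0) by omega,
          if_false, ite_false, Option.map_some]
        have e1 : i + 1 + d - (i + 1) = d := by omega
        have e2 : i + 1 + d - i - 1 = d := by omega
        simp only [e1, e2]
        by_cases hjd : j' = d
        · subst hjd
          simp [show j' + i + 1 = i + 1 + j' from by omega]
          ring
        · simp [show ¬ (j' + i + 1 = i + 1 + d) by omega, hjd]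
  · rw [List.getElem?_eq_none (by omega)]
    simp

theorem zip_rep (res : List Int) (m : Nat) (hm : res.length ≤ m) :
    List.zipWith (· + ·) res (List.replicate m 0) = res :=
  zip_zero_right res _ (by simpa) (by intro k hk; simp)

theorem solutionLoop_eq (n d : Nat) : ∀ (i : Nat) (p res : List Int), n - i ≤ d →
    p.length = n → res.length = n →
    solutionLoop n i p res
      = List.zipWith (· + ·) res (List.replicate i 0 ++ solGo (p.drop i)) := by
  induction d with
  | zero =>
    intro i p res hd hp hr
    rw [solutionLoop, dif_neg (by omega)]
    rw [List.drop_eq_nil_of_le (by omega)]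
    rw [show solGo [] = [] by rw [solGo], List.append_nil]
    exact (zip_rep res i (by omega)).symm
  | succ d ih =>
    intro i p res hd hp hr
    by_cases hlt : i < n - 1
    · have hilt : i < p.length := by omega
      have htl : (p.drop (i+1)).length = n - (i+1) := by simp [hp]
      have hval : (PySem.List.pyGet? p (i : Int)).getD 0 = p[i] := by
        rw [PySem.List.pyGet?_natCast, List.getElem?_eq_getElem hilt]; rfl
      have hslice : PySem.List.slice p (some ((i : Int) + 1)) none = p.drop (i+1) := by
        have hc : ((i : Int) + 1) = ((i + 1 : Nat) : Int) := by push_cast; ring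
        rw [hc, PySem.List.slice_from_natCast]
      obtain ⟨y, t, hyt⟩ : ∃ y t, p.drop (i+1) = y :: t := by
        cases h : p.drop (i+1) with
        | nil => rw [h] at htl; simp at htl; omega
        | cons a l => exact ⟨a, l, rfl⟩
      obtain ⟨mv, hmv⟩ : ∃ mv, PySem.List.min? (p.drop (i+1)) (fun z => z) = some mv := by
        cases h : PySem.List.min? (p.drop (i+1)) (fun z => z) with
        | none => rw [PySem.List.min?_eq_none_iff] at h; rw [h] at htl; simp at htl; omega
        | some mv => exact ⟨mv, rfl⟩
      have hdropi : p.drop i = p[i] :: p.drop (i+1) := List.drop_eq_getElem_cons hilt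
      rw [solutionLoop]
      simp only [dif_pos hlt, hval, hslice, hmv, Option.getD_some]
      by_cases hgt : p[i] > mv
      · have hmem : mv ∈ p.drop (i+1) := PySem.List.min?_mem hmv
        obtain ⟨j', hj'⟩ : ∃ j', PySem.List.index? (p.drop (i+1)) mv = some j' :=
          Option.isSome_iff_exists.mp ((PySem.List.index?_isSome_iff _ _).mpr hmem)
        obtain ⟨hj'lt, -⟩ := PySem.List.getElem_of_index?_eq_some hj'
        rw [if_pos hgt, hj']
        simp only [Option.getD_some]
        rw [ih (i+1) ((p.set i mv).set (j' + i + 1) p[i])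
              ((res.modify i (· + 1)).modify (j' + i + 1) (· + 1))
              (by omega) (by simp [hp]) (by simp [hr])]
        have hdrop' : ((p.set i mv).set (j' + i + 1) p[i]).drop (i+1)
            = (p.drop (i+1)).set j' p[i] := by
          rw [List.drop_set, if_neg (by omega), List.drop_set_of_lt (by omega)]
          congr 1
          omega
        rw [hdrop']
        have hB : solGo (p.drop i)
            = 1 :: (solGo ((p.drop (i+1)).set j' p[i])).modify j' (· + 1) := by
          rw [hdropi, hyt, solGo, ← hyt]
          simp only [hmv, Option.getD_some, hj']
          rw [if_pos hgt]
        rw [hB]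
        exact key_eq res _ i j'
          (by rw [solGo_length, List.length_set]; exact hj'lt)
          (by rw [solGo_length, List.length_set]; omega)
      · rw [if_neg hgt]
        rw [ih (i+1) p res (by omega) hp hr]
        have hB : solGo (p.drop i) = 0 :: solGo (p.drop (i+1)) := by
          rw [hdropi, hyt, solGo, ← hyt]
          simp only [hmv, Option.getD_some]
          rw [if_neg hgt]
        rw [hB]
        have hrep : List.replicate (i+1) (0:Int) ++ solGo (p.drop (i+1))
            = List.replicate i 0 ++ 0 :: solGo (p.drop (i+1)) := by
          rw [List.replicate_succ']
          simp [List.append_assoc]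
        rw [hrep]
    · rw [solutionLoop, dif_neg hlt]
      by_cases hn : i ≥ n
      · rw [List.drop_eq_nil_of_le (by omega)]
        rw [show solGo [] = [] by rw [solGo], List.append_nil]
        exact (zip_rep res i (by omega)).symm
      · -- i = n - 1, the dropped suffix is a single element
        have hi : i = n - 1 := by omega
        have hlen1 : (p.drop i).length = 1 := by simp [hp]; omega
        obtain ⟨x, hx⟩ : ∃ x, p.drop i = [x] := by
          cases hpd : p.drop i with
          | nil => simp [hpd] at hlen1
          | cons a l => cases l with
            | nil => exact ⟨a, rfl⟩
            | cons b l' => simp [hpd] at hlen1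
        rw [hx, show solGo [x] = [0] by rw [solGo]]
        rw [show (List.replicate i (0:Int) ++ [0]) = List.replicate (i+1) 0 by simp [List.replicate_succ']]
        exact (zip_rep res (i+1) (by omega)).symm

theorem zip_rep_left (ys : List Int) (m : Nat) (hm : ys.length ≤ m) :
    List.zipWith (· + ·) (List.replicate m 0) ys = ys := by
  apply List.ext_getElem
  · simp; omega
  · intro k h1 h2
    simp [List.getElem_zipWith, List.getElem_replicate]

-- ===== VERDICT (by name: the statement is the Claim_ definition above) =====
theorem solution_spec : Claim_equal_solution := by
  intro p _
  show solution p = solution_alt p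
  rw [solution, solution_alt,
    solutionLoop_eq p.length p.length 0 p (List.replicate p.length 0) (by omega) rfl (by simp)]
  rw [solOps_go]
  simpa using zip_rep_left (solGo p) p.length (by simp [solGo_length])
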